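-- pv_equiv track=rewrite | github.com/jk2642000/RAG-Desktop-Assistant | core/ml_analytics.py | _extract_common_phrases
-- ===== SOURCE A (Python) =====
-- from typing import Dict, List, Tuple
--
-- def _extract_common_phrases(responses: List[str]) -> List[str]:
--     # Simple phrase extraction
--     phrases = []
--     for response in responses:
--         if "I don't" in response or "I can't" in response:
--             phrases.append("inability_phrases")
--         if "error" in response.lower():
--             phrases.append("error_responses")
--
--     return list(set(phrases))
-- ===== SOURCE B (Python) =====
-- def _extract_common_phrases(responses):
--     markers = (
--         ("inability_phrases", lambda r: "I don't" in r or "I can't" in r),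
--         ("error_responses", lambda r: "error" in r.lower()),
--     )
--     return [name for name, hit in markers if any(hit(r) for r in responses)]
-- ===== Notes on version B (the rewrite author's own statement) =====
-- stated objective: simpler
-- what changed: Replaces A's accumulate-every-hit-then-list(set(...)) pass with two short-circuiting any() existence scans, one per marker, emitting each marker name at most once in a fixed deterministic order.
import Mathlib
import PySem

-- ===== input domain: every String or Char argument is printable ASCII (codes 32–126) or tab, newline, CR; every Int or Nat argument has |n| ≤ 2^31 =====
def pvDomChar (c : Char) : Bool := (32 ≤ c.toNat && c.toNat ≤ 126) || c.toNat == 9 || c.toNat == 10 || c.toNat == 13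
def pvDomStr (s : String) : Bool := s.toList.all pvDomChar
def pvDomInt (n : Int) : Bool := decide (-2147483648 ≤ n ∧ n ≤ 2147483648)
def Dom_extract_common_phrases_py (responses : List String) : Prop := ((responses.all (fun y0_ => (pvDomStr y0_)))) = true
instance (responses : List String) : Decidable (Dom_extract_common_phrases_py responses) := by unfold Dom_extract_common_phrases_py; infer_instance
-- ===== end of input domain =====

-- B replaces A's accumulate-then-dedup pass with one short-circuiting existence scan per marker (objective: simpler).

-- ===== PORT A =====
def extract_common_phrases_py (responses : List String) : List String :=
  let phrases := responses.foldl (fun phrases response =>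
    let phrases := if PySem.Str.isIn "I don't" response || PySem.Str.isIn "I can't" response
      then phrases ++ ["inability_phrases"] else phrases
    if PySem.Str.isIn "error" (PySem.Str.lower response)
      then phrases ++ ["error_responses"] else phrases) []
  -- list(set(phrases)): ported as first-occurrence dedup, exact under Pre_ (the set holds ≤ 1 distinct element there)
  PySem.Set.ofList phrases

-- ===== PORT B =====
def extract_common_phrases_py_alt (responses : List String) : List String :=
  let markers : List (String × (String → Bool)) :=
    [("inability_phrases", fun r => PySem.Str.isIn "I don't" r || PySem.Str.isIn "I can't" r),
     ("error_responses", fun r => PySem.Str.isIn "error" (PySem.Str.lower r))]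
  markers.filterMap (fun m => if responses.any m.2 then some m.1 else none)

-- ===== PRECONDITION & SPEC =====
-- Pre_ excludes inputs on which BOTH marker categories occur: there A returns list of a two-element set,
-- whose order depends on the interpreter's hash seed — both orders are equally defensible, and B picks a fixed one.
def Pre_extract_common_phrases_py (responses : List String) : Prop :=
  ¬ (responses.any (fun r => PySem.Str.isIn "I don't" r || PySem.Str.isIn "I can't" r) = true
     ∧ responses.any (fun r => PySem.Str.isIn "error" (PySem.Str.lower r)) = true)
instance (responses : List String) : Decidable (Pre_extract_common_phrases_py responses) := by
  unfold Pre_extract_common_phrases_py; infer_instance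
def pvWitness_extract_common_phrases_py : List String := ["I don't know that", "fine"]
def Spec_extract_common_phrases_py (responses : List String) (out : List String) : Prop := out = extract_common_phrases_py_alt responses
instance (responses : List String) (out : List String) : Decidable (Spec_extract_common_phrases_py responses out) := by unfold Spec_extract_common_phrases_py; infer_instance

-- ===== CLAIM (what is proved, stated in full; the proofs are below) =====
def Claim_equal_extract_common_phrases_py : Prop := ∀ (responses : List String), Dom_extract_common_phrases_py responses → Pre_extract_common_phrases_py responses → Spec_extract_common_phrases_py responses (extract_common_phrases_py responses)

-- ===== LEMMAS AND PROOFS =====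

-- A's loop appends per-response chunks: the foldl is a flatMap
theorem pv_foldl_chunks (pI pE : String → Bool) (l : List String) (acc : List String) :
    l.foldl (fun phrases response =>
      let phrases := if pI response then phrases ++ ["inability_phrases"] else phrases
      if pE response then phrases ++ ["error_responses"] else phrases) acc
    = acc ++ l.flatMap (fun r =>
        (if pI r then ["inability_phrases"] else []) ++ (if pE r then ["error_responses"] else [])) := by
  induction l generalizing acc with
  | nil => simp
  | cons a t ih =>
    simp only [List.foldl_cons, List.flatMap_cons, ih]
    by_cases h1 : pI a <;> by_cases h2 : pE a <;> simp [h1, h2]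

-- set(l) for a list all of whose elements equal x
theorem pv_foldl_add_const {x : String} (t : List String) (h : ∀ y ∈ t, y = x) :
    t.foldl PySem.Set.add [x] = [x] := by
  induction t with
  | nil => rfl
  | cons a r ih =>
    have ha : a = x := h a (by simp)
    simp only [List.foldl_cons, ha]
    have hadd : PySem.Set.add [x] x = [x] := by simp [PySem.Set.add]
    rw [hadd]
    exact ih (fun y hy => h y (by simp [hy]))

theorem pv_ofList_const {x : String} (l : List String) (h : ∀ y ∈ l, y = x) (hne : l ≠ []) :
    PySem.Set.ofList l = [x] := by
  cases l with
  | nil => exact absurd rfl hne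
  | cons a t =>
    have ha : a = x := h a (by simp)
    subst ha
    have : PySem.Set.ofList (a :: t) = t.foldl PySem.Set.add [a] := by
      simp [PySem.Set.ofList_eq_foldl, PySem.Set.add]
    rw [this]
    exact pv_foldl_add_const t (fun y hy => h y (by simp [hy]))

-- ===== VERDICT (by name: the statement is the Claim_ definition above) =====
theorem extract_common_phrases_py_spec : Claim_equal_extract_common_phrases_py := by
  intro responses _ hPre
  unfold Spec_extract_common_phrases_py extract_common_phrases_py extract_common_phrases_py_alt
  rw [pv_foldl_chunks]
  simp only [List.nil_append, List.filterMap_cons, List.filterMap_nil]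
  by_cases hI : responses.any (fun r => PySem.Str.isIn "I don't" r || PySem.Str.isIn "I can't" r) = true
  · by_cases hE : responses.any (fun r => PySem.Str.isIn "error" (PySem.Str.lower r)) = true
    · exact absurd ⟨hI, hE⟩ hPre
    · -- only the inability marker occurs
      rw [Bool.not_eq_true] at hE
      have hEall : ∀ r ∈ responses, PySem.Str.isIn "error" (PySem.Str.lower r) = false := by
        simpa [List.any_eq_false] using hE
      obtain ⟨r0, hr0, hp0⟩ := List.any_eq_true.mp hI
      have hmem : "inability_phrases" ∈ responses.flatMap (fun r =>
          (if (PySem.Str.isIn "I don't" r || PySem.Str.isIn "I can't" r) = true then ["inability_phrases"] else [])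
          ++ (if PySem.Str.isIn "error" (PySem.Str.lower r) = true then ["error_responses"] else [])) := by
        refine List.mem_flatMap.mpr ⟨r0, hr0, ?_⟩
        rw [hEall r0 hr0]
        simp only [hp0]
        simp
      rw [pv_ofList_const (x := "inability_phrases") _ ?hall (List.ne_nil_of_mem hmem), hI, hE]
      · simp
      case hall =>
        intro y hy
        obtain ⟨r, hr, hyr⟩ := List.mem_flatMap.mp hy
        rcases List.mem_append.mp hyr with h | h
        · revert h; split <;> simp_all
        · rw [hEall r hr] at h; simp at h
  · -- no inability marker anywhere
    rw [Bool.not_eq_true] at hI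
    have hIall : ∀ r ∈ responses, (PySem.Str.isIn "I don't" r || PySem.Str.isIn "I can't" r) = false := by
      simpa [List.any_eq_false] using hI
    have hflat : responses.flatMap (fun r =>
        (if (PySem.Str.isIn "I don't" r || PySem.Str.isIn "I can't" r) = true then ["inability_phrases"] else [])
        ++ (if PySem.Str.isIn "error" (PySem.Str.lower r) = true then ["error_responses"] else []))
        = responses.flatMap (fun r =>
        (if PySem.Str.isIn "error" (PySem.Str.lower r) = true then ["error_responses"] else [])) := by
      refine List.flatMap_congr ?_
      intro r hr
      rw [hIall r hr]
      simp
    rw [hflat]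
    by_cases hE : responses.any (fun r => PySem.Str.isIn "error" (PySem.Str.lower r)) = true
    · obtain ⟨r0, hr0, hp0⟩ := List.any_eq_true.mp hE
      have hmem : "error_responses" ∈ responses.flatMap (fun r =>
          (if PySem.Str.isIn "error" (PySem.Str.lower r) = true then ["error_responses"] else [])) := by
        refine List.mem_flatMap.mpr ⟨r0, hr0, ?_⟩
        simp only [hp0]
        simp
      rw [pv_ofList_const (x := "error_responses") _ ?hall2 (List.ne_nil_of_mem hmem), hI, hE]
      · simp
      case hall2 =>
        intro y hy
        obtain ⟨r, hr, hyr⟩ := List.mem_flatMap.mp hy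
        revert hyr; split <;> simp_all
    · rw [Bool.not_eq_true] at hE
      have hEall : ∀ r ∈ responses, PySem.Str.isIn "error" (PySem.Str.lower r) = false := by
        simpa [List.any_eq_false] using hE
      have hnil : responses.flatMap (fun r =>
          (if PySem.Str.isIn "error" (PySem.Str.lower r) = true then ["error_responses"] else [])) = [] := by
        simp only [List.flatMap_eq_nil_iff]
        intro r hr
        rw [hEall r hr]
        simp
      rw [hnil, hI, hE]
      rfl
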